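/- GENERATED by farm/mkstatement.py from design/units.tsv (unit `compute_codewords.COMPOSITION`) and the Specs of Vorbis/Spec/*.lean — do not edit.
   THE STATEMENT of the proof unit `compute_codewords.COMPOSITION`: the function `compute_codewords` (145 instructions) satisfies its contract,
   GIVEN THE STATEMENTS OF ITS 9 SEGMENTS (`Vorbis.Spec.compute_codewords.Seg<k> Lay μ u₀`: what the unit `compute_codewords.<k>` proves).
   No machine code is walked: `ReachVia.trans` along the segments (the exit assertion of a segment is the entry assertion of
   its successor), an induction on the loop measures. What the names mean: Vorbis/Spec/Basic.lean. The theorem to prove: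
   `theorem compute_codewords_COMPOSITION_ok : Vorbis.Spec.compute_codewords_COMPOSITION.Statement`. -/
import Vorbis.Spec.Codebook
import Vorbis.Spec.Codebook.Codewords
namespace Vorbis.Spec.compute_codewords_COMPOSITION
open X86 X86.User Asan

/-- The statement of unit `compute_codewords.COMPOSITION`. -/
def Statement : Prop :=
  ∀ (Lay : Layout) (_hLay : Lay.hi = 0x1000000) (μ : Microarch) (_hμ : UserX.MicroOK μ) (u₀ : State)
    (_h_compute_codewords_1 : Vorbis.Spec.compute_codewords.Seg1 Lay μ u₀)
    (_h_compute_codewords_2 : Vorbis.Spec.compute_codewords.Seg2 Lay μ u₀)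
    (_h_compute_codewords_3 : Vorbis.Spec.compute_codewords.Seg3 Lay μ u₀)
    (_h_compute_codewords_4 : Vorbis.Spec.compute_codewords.Seg4 Lay μ u₀)
    (_h_compute_codewords_5 : Vorbis.Spec.compute_codewords.Seg5 Lay μ u₀)
    (_h_compute_codewords_6 : Vorbis.Spec.compute_codewords.Seg6 Lay μ u₀)
    (_h_compute_codewords_7 : Vorbis.Spec.compute_codewords.Seg7 Lay μ u₀)
    (_h_compute_codewords_8 : Vorbis.Spec.compute_codewords.Seg8 Lay μ u₀)
    (_h_compute_codewords_9 : Vorbis.Spec.compute_codewords.Seg9 Lay μ u₀),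
    ∀ (others : List Obj) (frames : List (Nat × FrameLayout)) (Blk : Block → Prop), Calls Lay μ Vorbis.WayInv (Vorbis.conv u₀) Vorbis.L.compute_codewords.entry (Vorbis.Spec.compute_codewords.spec others frames Blk)

end Vorbis.Spec.compute_codewords_COMPOSITION
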